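-- pv_equiv track=rewrite | github.com/1seansean1/ecom-agents | tests/security/test_api_authentication.py | _fill_path_params
-- ===== SOURCE A (Python) =====
-- def _fill_path_params(path: str) -> str:
--     """Replace FastAPI path parameters with test values."""
--     replacements = {
--         "{agent_id}": "test-agent",
--         "{channel_id}": "K1",
--         "{theta_id}": "default",
--         "{job_id}": "test-job",
--         "{dlq_id}": "1",
--         "{approval_id}": "1",
--         "{suite_id}": "test-suite",
--         "{trace_id}": "test-trace",
--         "{thread_id}": "test-thread",
--         "{goal_id}": "test-goal",
--         "{image_id}": "1",
--         "{version}": "1",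
--         "{workflow_id}": "test-workflow",
--         "{config_hash}": "abc123",
--         "{file_path:path}": "index.html",
--     }
--     result = path
--     for param, value in replacements.items():
--         result = result.replace(param, value)
--     return result
-- ===== SOURCE B (Python) =====
-- _PARAMS = {
--     "agent_id": "test-agent",
--     "channel_id": "K1",
--     "theta_id": "default",
--     "job_id": "test-job",
--     "dlq_id": "1",
--     "approval_id": "1",
--     "suite_id": "test-suite",
--     "trace_id": "test-trace",
--     "thread_id": "test-thread",
--     "goal_id": "test-goal",
--     "image_id": "1",
--     "version": "1",
--     "workflow_id": "test-workflow",
--     "config_hash": "abc123",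
--     "file_path:path": "index.html",
-- }
--
--
-- def _fill_path_params(path: str) -> str:
--     """Replace FastAPI path parameters with test values.
--
--     Single left-to-right scan: at each '{' read the token up to the next '}'
--     and substitute it via one dict lookup on the bare parameter name;
--     anything else (unknown tokens, stray braces) is copied through unchanged.
--     """
--     out = []
--     i = 0
--     n = len(path)
--     while i < n:
--         c = path[i]
--         if c == "{":
--             j = path.find("}", i)
--             if j != -1:
--                 name = path[i + 1 : j]
--                 if name in _PARAMS:
--                     out.append(_PARAMS[name])
--                     i = j + 1
--                     continue
--         out.append(c)
--         i += 1
--     return "".join(out)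
-- ===== Notes on version B (the rewrite author's own statement) =====
-- stated objective: alternative
-- what changed: Replaces 15 sequential full-string str.replace passes over a brace-keyed dict with one left-to-right index scan that, at each '{', slices the token up to the next '}' and substitutes it via a single lookup in a dict keyed by the bare parameter name.
import Mathlib
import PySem

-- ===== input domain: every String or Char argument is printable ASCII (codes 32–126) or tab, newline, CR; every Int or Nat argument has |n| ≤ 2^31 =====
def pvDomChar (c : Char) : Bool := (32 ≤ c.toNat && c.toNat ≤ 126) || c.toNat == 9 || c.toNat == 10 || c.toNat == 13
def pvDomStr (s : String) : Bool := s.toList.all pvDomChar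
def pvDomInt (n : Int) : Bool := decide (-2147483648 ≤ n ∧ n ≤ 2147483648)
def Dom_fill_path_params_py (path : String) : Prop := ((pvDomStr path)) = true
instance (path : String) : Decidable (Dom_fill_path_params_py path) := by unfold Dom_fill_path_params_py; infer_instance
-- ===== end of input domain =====

set_option maxRecDepth 8000

-- B replaces A's 15 sequential full-string str.replace passes (dict keyed by brace tokens) by one
-- left-to-right index scan that, at each '{', reads the token up to the next '}' and substitutes it
-- via a single lookup in a dict keyed by the BARE parameter name; same return value, no side effects.

-- ===== PORT A =====
-- A's replacements dict (dict → assoc list, insertion order), keys are the full brace tokens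
def pvReplacements : List (String × String) :=
  [("{agent_id}", "test-agent"),
   ("{channel_id}", "K1"),
   ("{theta_id}", "default"),
   ("{job_id}", "test-job"),
   ("{dlq_id}", "1"),
   ("{approval_id}", "1"),
   ("{suite_id}", "test-suite"),
   ("{trace_id}", "test-trace"),
   ("{thread_id}", "test-thread"),
   ("{goal_id}", "test-goal"),
   ("{image_id}", "1"),
   ("{version}", "1"),
   ("{workflow_id}", "test-workflow"),
   ("{config_hash}", "abc123"),
   ("{file_path:path}", "index.html")]

-- for param, value in replacements.items(): result = result.replace(param, value)
def fill_path_params_py (path : String) : String :=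
  pvReplacements.foldl (fun result pv => PySem.Str.replace result pv.1 pv.2) path

-- ===== PORT B =====
-- B's dict _PARAMS, keyed by the bare parameter name (no braces)
def pvParams : List (String × String) :=
  [("agent_id", "test-agent"),
   ("channel_id", "K1"),
   ("theta_id", "default"),
   ("job_id", "test-job"),
   ("dlq_id", "1"),
   ("approval_id", "1"),
   ("suite_id", "test-suite"),
   ("trace_id", "test-trace"),
   ("thread_id", "test-thread"),
   ("goal_id", "test-goal"),
   ("image_id", "1"),
   ("version", "1"),
   ("workflow_id", "test-workflow"),
   ("config_hash", "abc123"),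
   ("file_path:path", "index.html")]

-- j = path.find('}', i); name = path[i+1:j] — split the tail at the first '}' (none = not found)
def pvSplitAtClose : List Char → Option (List Char × List Char)
  | [] => none
  | c :: t =>
    if c = '}' then some ([], t)
    else (pvSplitAtClose t).map (fun p => (c :: p.1, p.2))

-- termination fact for the scan (cited by pvScanB's decreasing_by)
theorem pvSplitAtClose_rest_length :
    ∀ (t name rest : List Char), pvSplitAtClose t = some (name, rest) → rest.length ≤ t.length := by
  intro t
  induction t with
  | nil => intro name rest h; simp [pvSplitAtClose] at h
  | cons c t' ih =>
    intro name rest h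
    rw [pvSplitAtClose] at h
    by_cases hc : c = '}'
    · rw [if_pos hc] at h
      obtain ⟨h1, h2⟩ := Prod.mk.injEq .. ▸ Option.some.injEq .. ▸ h
      cases h
      simp
    · rw [if_neg hc] at h
      cases hs : pvSplitAtClose t' with
      | none => rw [hs] at h; simp at h
      | some p =>
        rw [hs] at h
        simp at h
        have := ih p.1 p.2 (by rw [hs])
        obtain ⟨h1, h2⟩ := h
        simp [← h2, this]
        omega

-- the while loop of B: copy chars; at '{' with a closing '}' ahead and a known bare name,
-- emit the dict value and resume after the '}'
def pvScanB : List Char → List Char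
  | [] => []
  | c :: t =>
    if c = '{' then
      match h : pvSplitAtClose t with
      | some (name, rest) =>
        match pvParams.find? (fun nv => nv.1.toList == name) with
        | some nv => nv.2.toList ++ pvScanB rest
        | none => c :: pvScanB t
      | none => c :: pvScanB t
    else c :: pvScanB t
  termination_by s => s.length
  decreasing_by
    · have := pvSplitAtClose_rest_length t name rest h
      simp only [List.length_cons]
      omega
    all_goals simp

def fill_path_params_py_alt (path : String) : String :=
  String.ofList (pvScanB path.toList)

-- ===== PRECONDITION & SPEC =====
def Spec_fill_path_params_py (path : String) (out : String) : Prop := out = fill_path_params_py_alt path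
instance (path : String) (out : String) : Decidable (Spec_fill_path_params_py path out) := by unfold Spec_fill_path_params_py; infer_instance

-- ===== CLAIM (what is proved, stated in full; the proofs are below) =====
def Claim_equal_fill_path_params_py : Prop := ∀ (path : String), Dom_fill_path_params_py path → Spec_fill_path_params_py path (fill_path_params_py path)

-- ===== LEMMAS AND PROOFS =====

-- proof-side: the replacement pairs at the char-list level
def pvPairsC : List (List Char × List Char) :=
  pvReplacements.map (fun pv => (pv.1.toList, pv.2.toList))

-- proof-side intermediate scanner: at each position try the keys in order as literal prefixes
def pvScanC (keys : List (List Char)) (lookup : List Char → List Char) : List Char → List Char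
  | [] => []
  | c :: t =>
    match keys.find? (fun k => k.isPrefixOf (c :: t)) with
    | some k => lookup k ++ pvScanC keys lookup (t.drop (k.length - 1))
    | none => c :: pvScanC keys lookup t
  termination_by s => s.length
  decreasing_by
    · simp only [List.length_drop, List.length_cons]; omega
    · simp

def pvLookup (k : List Char) : List Char :=
  (((pvReplacements.find? (fun pv => pv.1.toList == k)).map (·.2)).getD "").toList

-- A's str.replace, in recursive leftmost-scan form
def pvRepl (old new : List Char) : List Char → List Char
  | [] => []
  | c :: t =>
    if old.isPrefixOf (c :: t) then new ++ pvRepl old new (t.drop (old.length - 1))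
    else c :: pvRepl old new t
  termination_by s => s.length
  decreasing_by
    · simp only [List.length_drop, List.length_cons]; omega
    · simp

def pvFoldR (L : List (List Char × List Char)) (s : List Char) : List Char :=
  L.foldl (fun acc pv => pvRepl pv.1 pv.2 acc) s

-- key shape: length ≥ 2, starts '{', no further '{', ends '}'
def pvGoodKey (p : List Char) : Bool :=
  2 ≤ p.length && p.head? == some '{' && p.tail.all (· != '{') && p.getLast? == some '}'

-- value shape: nonempty, no braces
def pvGoodVal (v : List Char) : Bool :=
  !v.isEmpty && v.all (fun c => c != '{' && c != '}')

-- no value is a prefix of a proper suffix of a key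
def pvNoValIn (p w : List Char) : Bool :=
  (List.range p.length).all (fun i => !(w.isPrefixOf (p.drop (i + 1))))

theorem pvFacts_good : ∀ pv ∈ pvPairsC, pvGoodKey pv.1 = true ∧ pvGoodVal pv.2 = true := by decide

theorem pvFacts_noval : ∀ pv ∈ pvPairsC, ∀ qw ∈ pvPairsC, pvNoValIn pv.1 qw.2 = true := by decide

theorem pvFacts_lookup : ∀ pv ∈ pvPairsC, pvLookup pv.1 = pv.2 := by decide

theorem pvFacts_ne : ∀ pv ∈ pvReplacements, pv.1.toList ≠ [] := by decide

-- A's brace-token pairs are exactly B's bare-name pairs with '{' … '}' wrapped around the key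
theorem pvFacts_pairs :
    pvPairsC = pvParams.map (fun nv => ('{' :: (nv.1.toList ++ ['}']), nv.2.toList)) := by decide

-- bare names contain no braces
theorem pvFacts_namesB :
    pvParams.all (fun nv => nv.1.toList.all (fun c => !(c == '}') && !(c == '{'))) = true := by rfl

theorem pvFacts_names : ∀ nv ∈ pvParams, ∀ c ∈ nv.1.toList, c ≠ '}' ∧ c ≠ '{' := by
  intro nv hnv c hc
  have h1 := List.all_eq_true.1 pvFacts_namesB nv hnv
  have h2 := List.all_eq_true.1 h1 c hc
  simp at h2
  exact h2

-- structural consequences of pvGoodKey / pvGoodVal used below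
theorem pvGoodKey_head {p : List Char} (h : pvGoodKey p = true) : p.head? = some '{' := by
  simp [pvGoodKey] at h; exact h.1.1.2

theorem pvGoodKey_ne {p : List Char} (h : pvGoodKey p = true) : p ≠ [] := by
  intro hn; subst hn; simp [pvGoodKey] at h

theorem pvGoodKey_last {p : List Char} (h : pvGoodKey p = true) : p.getLast? = some '}' := by
  simp [pvGoodKey] at h; exact h.2

theorem pvGoodKey_tail {p : List Char} (h : pvGoodKey p = true) : ∀ c ∈ p.tail, c ≠ '{' := by
  simp [pvGoodKey] at h
  exact h.1.2

theorem pvGoodKey_tail_ne {p0 : Char} {p' : List Char} (h : pvGoodKey (p0 :: p') = true) :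
    p' ≠ [] := by
  intro hn
  subst hn
  simp [pvGoodKey] at h

theorem pvGoodVal_ne {v : List Char} (h : pvGoodVal v = true) : v ≠ [] := by
  simp [pvGoodVal] at h; exact h.1

theorem pvGoodVal_noOpen {v : List Char} (h : pvGoodVal v = true) : ∀ c ∈ v, c ≠ '{' := by
  simp [pvGoodVal] at h
  exact fun c hc => (h.2 c hc).1

theorem pvGoodVal_noClose {v : List Char} (h : pvGoodVal v = true) : ∀ c ∈ v, c ≠ '}' := by
  simp [pvGoodVal] at h
  exact fun c hc => (h.2 c hc).2

-- equation lemmas for pvRepl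
theorem pvRepl_nil (old new : List Char) : pvRepl old new [] = [] := by simp [pvRepl]

theorem pvRepl_cons_pos (old new : List Char) (c : Char) (t : List Char)
    (h : old <+: (c :: t)) :
    pvRepl old new (c :: t) = new ++ pvRepl old new (t.drop (old.length - 1)) := by
  rw [pvRepl, if_pos (List.isPrefixOf_iff_prefix.2 h)]

theorem pvRepl_cons_neg (old new : List Char) (c : Char) (t : List Char)
    (h : ¬ old <+: (c :: t)) :
    pvRepl old new (c :: t) = c :: pvRepl old new t := by
  rw [pvRepl, if_neg (fun hb => h (List.isPrefixOf_iff_prefix.1 hb))]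

-- PySem.Chars.replace agrees with pvRepl for nonempty pattern
theorem pvGo_spec (old new : List Char) (hold : old ≠ []) :
    ∀ (fuel : Nat) (l acc : List Char), l.length ≤ fuel →
      PySem.Chars.replace.go old new fuel l acc = acc.reverse ++ pvRepl old new l := by
  intro fuel
  induction fuel with
  | zero =>
    intro l acc hl
    have : l = [] := List.eq_nil_of_length_eq_zero (Nat.le_zero.1 hl)
    subst this
    simp [PySem.Chars.replace.go, pvRepl_nil]
  | succ n ih =>
    intro l acc hl
    match l with
    | [] => simp [PySem.Chars.replace.go, pvRepl_nil]
    | c :: t =>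
      rw [PySem.Chars.replace.go]
      by_cases h : old <+: (c :: t)
      · rw [if_pos (List.isPrefixOf_iff_prefix.2 h)]
        have hlen : 1 ≤ old.length := by
          cases old with
          | nil => exact absurd rfl hold
          | cons a b => simp
        have hdrop : List.drop old.length (c :: t) = t.drop (old.length - 1) := by
          obtain ⟨m, hm⟩ : ∃ m, old.length = m + 1 := ⟨old.length - 1, by omega⟩
          simp [hm]
        have hle : (List.drop old.length (c :: t)).length ≤ n := by
          simp only [List.length_drop, List.length_cons] at *
          omega
        rw [ih _ _ hle, hdrop, pvRepl_cons_pos old new c t h]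
        simp
      · rw [if_neg (fun hb => h (List.isPrefixOf_iff_prefix.1 hb))]
        have hle : t.length ≤ n := by simp at hl; omega
        rw [ih _ _ hle, pvRepl_cons_neg old new c t h]
        simp

theorem pvReplace_eq (old new s : List Char) (hold : old ≠ []) :
    PySem.Chars.replace s old new = pvRepl old new s := by
  rw [PySem.Chars.replace]
  rw [if_neg (by simp [hold])]
  simpa using pvGo_spec old new hold s.length s [] (le_refl _)

-- pvRepl passes over a block containing no '{' (keys all start with '{')
theorem pvVPreserve (q w : List Char) (hq : q.head? = some '{') :
    ∀ (v x : List Char), (∀ c ∈ v, c ≠ '{') → pvRepl q w (v ++ x) = v ++ pvRepl q w x := by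
  intro v
  induction v with
  | nil => simp
  | cons d v' ih =>
    intro x hv
    have hnp : ¬ q <+: (d :: (v' ++ x)) := by
      intro hp
      cases q with
      | nil => simp at hq
      | cons q0 q' =>
        have hq0 : q0 = '{' := by simpa using hq
        have := (List.cons_prefix_cons.1 hp).1
        exact hv d (by simp) (by rw [← this, hq0])
    rw [List.cons_append, pvRepl_cons_neg q w d (v' ++ x) hnp,
      ih x (fun c hc => hv c (by simp [hc])), List.cons_append]

-- last character of a nonempty drop of p is p's last character
theorem pvGetLast?_drop (p : List Char) (i : Nat) (h : p.drop i ≠ []) :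
    (p.drop i).getLast? = p.getLast? := by
  conv_rhs => rw [← List.take_append_drop i p]
  rw [List.getLast?_append]
  cases hg : (p.drop i).getLast? with
  | none => exact absurd (List.getLast?_eq_none_iff.1 hg) h
  | some a => simp

-- a proper suffix of a key that is a prefix of a replaced string was a prefix already
theorem pvSuffixPreserve (p wq q : List Char)
    (hgp : pvGoodKey p = true) (hgw : pvGoodVal wq = true) (hnv : pvNoValIn p wq = true) :
    ∀ (n : Nat) (t : List Char), t.length ≤ n → ∀ (i : Nat), 1 ≤ i → p.drop i ≠ [] →
      p.drop i <+: pvRepl q wq t → p.drop i <+: t := by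
  intro n
  induction n with
  | zero =>
    intro t ht i hi hne hpre
    have : t = [] := List.eq_nil_of_length_eq_zero (Nat.le_zero.1 ht)
    subst this
    rw [pvRepl_nil] at hpre
    exact absurd (List.prefix_nil.1 hpre) hne
  | succ n ih =>
    intro t ht i hi hne hpre
    match t with
    | [] =>
      rw [pvRepl_nil] at hpre
      exact absurd (List.prefix_nil.1 hpre) hne
    | d :: t' =>
      by_cases hq : q <+: (d :: t')
      · rw [pvRepl_cons_pos q wq d t' hq] at hpre
        exfalso
        rcases List.prefix_or_prefix_of_prefix hpre (List.prefix_append wq _) with h1 | h2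
        · have hlast : (p.drop i).getLast? = some '}' := by
            rw [pvGetLast?_drop p i hne]
            exact pvGoodKey_last hgp
          have hmem : '}' ∈ p.drop i := List.mem_of_getLast? hlast
          exact pvGoodVal_noClose hgw '}' (h1.subset hmem) rfl
        · have hlt : i - 1 < p.length := by
            by_contra hc
            exact hne (List.drop_eq_nil_of_le (by omega))
          have hall : ∀ j ∈ List.range p.length, (!(wq.isPrefixOf (p.drop (j + 1)))) = true :=
            List.all_eq_true.1 hnv
          have hj := hall (i - 1) (List.mem_range.2 hlt)
          rw [show i - 1 + 1 = i by omega] at hj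
          rw [List.isPrefixOf_iff_prefix.2 h2] at hj
          simp at hj
      · rw [pvRepl_cons_neg q wq d t' hq] at hpre
        cases hd : p.drop i with
        | nil => exact absurd hd hne
        | cons r0 r' =>
          rw [hd] at hpre
          have hhead : r0 = d := (List.cons_prefix_cons.1 hpre).1
          have htail : r' <+: pvRepl q wq t' := (List.cons_prefix_cons.1 hpre).2
          have hr' : r' = p.drop (i + 1) := by
            have := List.tail_drop (l := p) (i := i)
            rw [hd] at this
            simpa using this
          by_cases hr'e : r' = []
          · subst hr'e
            exact List.cons_prefix_cons.2 ⟨hhead, List.nil_prefix⟩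
          · have := ih t' (by simp at ht; omega) (i + 1) (by omega) (hr' ▸ hr'e) (hr' ▸ htail)
            exact List.cons_prefix_cons.2 ⟨hhead, hr' ▸ this⟩

-- a full key that is a prefix of a replaced string was a prefix already
theorem pvKeyPreserve (p q wq : List Char)
    (hgp : pvGoodKey p = true) (hgw : pvGoodVal wq = true) (hnv : pvNoValIn p wq = true) :
    ∀ (t : List Char), p <+: pvRepl q wq t → p <+: t := by
  intro t hpre
  match t with
  | [] =>
    rw [pvRepl_nil] at hpre
    exact absurd (List.prefix_nil.1 hpre) (pvGoodKey_ne hgp)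
  | d :: t' =>
    by_cases hq : q <+: (d :: t')
    · exfalso
      rw [pvRepl_cons_pos q wq d t' hq] at hpre
      rcases List.prefix_or_prefix_of_prefix hpre (List.prefix_append wq _) with h1 | h2
      · cases p with
        | nil => exact pvGoodKey_ne hgp rfl
        | cons p0 p' =>
          have hp0 : p0 = '{' := by simpa using pvGoodKey_head hgp
          cases wq with
          | nil => exact pvGoodVal_ne hgw rfl
          | cons w0 w' =>
            have := (List.cons_prefix_cons.1 h1).1
            exact pvGoodVal_noOpen hgw w0 (by simp) (by rw [← this, hp0])
      · cases wq with
        | nil => exact pvGoodVal_ne hgw rfl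
        | cons w0 w' =>
          cases p with
          | nil => exact pvGoodKey_ne hgp rfl
          | cons p0 p' =>
            have hp0 : p0 = '{' := by simpa using pvGoodKey_head hgp
            have := (List.cons_prefix_cons.1 h2).1
            exact pvGoodVal_noOpen hgw w0 (by simp) (by rw [this, hp0])
    · rw [pvRepl_cons_neg q wq d t' hq] at hpre
      cases p with
      | nil => exact absurd rfl (pvGoodKey_ne hgp)
      | cons p0 p' =>
        have hhead : p0 = d := (List.cons_prefix_cons.1 hpre).1
        have htail : p' <+: pvRepl q wq t' := (List.cons_prefix_cons.1 hpre).2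
        have hp'eq : p' = (p0 :: p').drop 1 := rfl
        have hp'ne : p' ≠ [] := pvGoodKey_tail_ne hgp
        have hres := pvSuffixPreserve (p0 :: p') wq q hgp hgw hnv t'.length t'
          (le_refl _) 1 (le_refl 1) (hp'eq ▸ hp'ne) (hp'eq ▸ htail)
        exact List.cons_prefix_cons.2 ⟨hhead, hp'eq ▸ hres⟩

-- fold over pairs keeps an unmatched head character
theorem pvFoldCons (c : Char) :
    ∀ (L : List (List Char × List Char)), (∀ pv ∈ L, pv ∈ pvPairsC) →
      ∀ (t : List Char), (∀ pv ∈ L, ¬ pv.1 <+: (c :: t)) →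
        pvFoldR L (c :: t) = c :: pvFoldR L t := by
  intro L
  induction L with
  | nil => intro _ t _; simp [pvFoldR]
  | cons qw rest ih =>
    intro hmem t hnp
    have hq := hnp qw (by simp)
    have hstep : pvRepl qw.1 qw.2 (c :: t) = c :: pvRepl qw.1 qw.2 t :=
      pvRepl_cons_neg qw.1 qw.2 c t hq
    have hrest : ∀ pv ∈ rest, ¬ pv.1 <+: (c :: pvRepl qw.1 qw.2 t) := by
      intro pv hpv hpre
      rw [← hstep] at hpre
      obtain ⟨hgp, _⟩ := pvFacts_good pv (hmem pv (by simp [hpv]))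
      obtain ⟨hgq, hgw⟩ := pvFacts_good qw (hmem qw (by simp))
      have hnv := pvFacts_noval pv (hmem pv (by simp [hpv])) qw (hmem qw (by simp))
      exact hnp pv (by simp [hpv]) (pvKeyPreserve pv.1 qw.1 qw.2 hgp hgw hnv (c :: t) hpre)
    calc pvFoldR (qw :: rest) (c :: t)
        = pvFoldR rest (pvRepl qw.1 qw.2 (c :: t)) := rfl
      _ = pvFoldR rest (c :: pvRepl qw.1 qw.2 t) := by rw [hstep]
      _ = c :: pvFoldR rest (pvRepl qw.1 qw.2 t) :=
          ih (fun pv hpv => hmem pv (by simp [hpv])) _ hrest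
      _ = c :: pvFoldR (qw :: rest) t := rfl

-- a single replace keeps an unmatched key-shaped head block
theorem pvHeadKeep (p q wq : List Char) (hgp : pvGoodKey p = true) (hgq : pvGoodKey q = true)
    (u : List Char) (h : ¬ q <+: (p ++ u)) :
    pvRepl q wq (p ++ u) = p ++ pvRepl q wq u := by
  cases p with
  | nil => exact absurd rfl (pvGoodKey_ne hgp)
  | cons p0 p' =>
    have hnob : ∀ c ∈ p', c ≠ '{' := fun c hc => pvGoodKey_tail hgp c (by simpa using hc)
    simp only [List.cons_append]
    rw [pvRepl_cons_neg q wq p0 (p' ++ u) (by simpa using h),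
      pvVPreserve q wq (pvGoodKey_head hgq) p' u hnob]

-- fold keeps an unmatched key-shaped head block
theorem pvFoldHead (k : List Char) (hgk : pvGoodKey k = true) :
    ∀ (L : List (List Char × List Char)), (∀ pv ∈ L, pv ∈ pvPairsC) →
      ∀ (u : List Char), (∀ pv ∈ L, ¬ pv.1 <+: (k ++ u)) →
        pvFoldR L (k ++ u) = k ++ pvFoldR L u := by
  intro L
  induction L with
  | nil => intro _ u _; simp [pvFoldR]
  | cons qw rest ih =>
    intro hmem u hnp
    obtain ⟨hgq, hgw⟩ := pvFacts_good qw (hmem qw (by simp))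
    have hstep : pvRepl qw.1 qw.2 (k ++ u) = k ++ pvRepl qw.1 qw.2 u :=
      pvHeadKeep k qw.1 qw.2 hgk hgq u (hnp qw (by simp))
    have hrest : ∀ pv ∈ rest, ¬ pv.1 <+: (k ++ pvRepl qw.1 qw.2 u) := by
      intro pv hpv hpre
      rw [← hstep] at hpre
      obtain ⟨hgp, _⟩ := pvFacts_good pv (hmem pv (by simp [hpv]))
      have hnv := pvFacts_noval pv (hmem pv (by simp [hpv])) qw (hmem qw (by simp))
      exact hnp pv (by simp [hpv]) (pvKeyPreserve pv.1 qw.1 qw.2 hgp hgw hnv (k ++ u) hpre)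
    calc pvFoldR (qw :: rest) (k ++ u)
        = pvFoldR rest (pvRepl qw.1 qw.2 (k ++ u)) := rfl
      _ = pvFoldR rest (k ++ pvRepl qw.1 qw.2 u) := by rw [hstep]
      _ = k ++ pvFoldR rest (pvRepl qw.1 qw.2 u) :=
          ih (fun pv hpv => hmem pv (by simp [hpv])) _ hrest
      _ = k ++ pvFoldR (qw :: rest) u := rfl

-- fold keeps an inserted value block (values contain no '{')
theorem pvFoldVal (v : List Char) (hv : ∀ c ∈ v, c ≠ '{') :
    ∀ (L : List (List Char × List Char)), (∀ pv ∈ L, pv ∈ pvPairsC) →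
      ∀ (y : List Char), pvFoldR L (v ++ y) = v ++ pvFoldR L y := by
  intro L
  induction L with
  | nil => intro _ y; simp [pvFoldR]
  | cons qw rest ih =>
    intro hmem y
    obtain ⟨hgq, _⟩ := pvFacts_good qw (hmem qw (by simp))
    have hstep : pvRepl qw.1 qw.2 (v ++ y) = v ++ pvRepl qw.1 qw.2 y :=
      pvVPreserve qw.1 qw.2 (pvGoodKey_head hgq) v y hv
    calc pvFoldR (qw :: rest) (v ++ y)
        = pvFoldR rest (pvRepl qw.1 qw.2 (v ++ y)) := rfl
      _ = pvFoldR rest (v ++ pvRepl qw.1 qw.2 y) := by rw [hstep]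
      _ = v ++ pvFoldR rest (pvRepl qw.1 qw.2 y) :=
          ih (fun pv hpv => hmem pv (by simp [hpv])) _
      _ = v ++ pvFoldR (qw :: rest) y := rfl

theorem pvFoldR_nil : ∀ (L : List (List Char × List Char)), pvFoldR L [] = [] := by
  intro L
  induction L with
  | nil => rfl
  | cons qw rest ih =>
    show pvFoldR rest (pvRepl qw.1 qw.2 []) = []
    rw [pvRepl_nil]
    exact ih

-- replacing a key at the head of the string
theorem pvReplSelf (k v u : List Char) (hk : k ≠ []) :
    pvRepl k v (k ++ u) = v ++ pvRepl k v u := by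
  cases k with
  | nil => exact absurd rfl hk
  | cons k0 k' =>
    simp only [List.cons_append]
    rw [pvRepl_cons_pos (k0 :: k') v k0 (k' ++ u) (by simp)]
    have hlen : (k0 :: k').length - 1 = k'.length := by simp
    rw [hlen, List.drop_left]

-- the fold over the whole pair list, when the first matching key k sits at the head
theorem pvFoldMatch (P₁ P₂ : List (List Char × List Char)) (k v : List Char)
    (hmem : ∀ pv ∈ P₁ ++ (k, v) :: P₂, pv ∈ pvPairsC)
    (u : List Char) (hP₁ : ∀ pv ∈ P₁, ¬ pv.1 <+: (k ++ u)) :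
    pvFoldR (P₁ ++ (k, v) :: P₂) (k ++ u) = v ++ pvFoldR (P₁ ++ (k, v) :: P₂) u := by
  obtain ⟨hgk, hgv⟩ := pvFacts_good (k, v) (hmem (k, v) (by simp))
  have hvnob : ∀ c ∈ v, c ≠ '{' := pvGoodVal_noOpen hgv
  have h1 : pvFoldR (P₁ ++ (k, v) :: P₂) (k ++ u)
      = pvFoldR ((k, v) :: P₂) (pvFoldR P₁ (k ++ u)) := by
    simp [pvFoldR, List.foldl_append]
  have h2 : pvFoldR P₁ (k ++ u) = k ++ pvFoldR P₁ u :=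
    pvFoldHead k hgk P₁ (fun pv hpv => hmem pv (by simp [hpv])) u hP₁
  have h3 : pvFoldR ((k, v) :: P₂) (k ++ pvFoldR P₁ u)
      = pvFoldR P₂ (v ++ pvRepl k v (pvFoldR P₁ u)) := by
    show pvFoldR P₂ (pvRepl k v (k ++ pvFoldR P₁ u)) = _
    rw [pvReplSelf k v _ (pvGoodKey_ne hgk)]
  have h4 : pvFoldR P₂ (v ++ pvRepl k v (pvFoldR P₁ u))
      = v ++ pvFoldR P₂ (pvRepl k v (pvFoldR P₁ u)) :=
    pvFoldVal v hvnob P₂ (fun pv hpv => hmem pv (by simp [hpv])) _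
  have h5 : pvFoldR P₂ (pvRepl k v (pvFoldR P₁ u)) = pvFoldR (P₁ ++ (k, v) :: P₂) u := by
    simp [pvFoldR, List.foldl_append]
  rw [h1, h2, h3, h4, h5]

-- main part 1: the 15-pass fold equals the prefix-alternation scan
theorem pvMain : ∀ (n : Nat) (s : List Char), s.length ≤ n →
    pvFoldR pvPairsC s = pvScanC (pvPairsC.map (·.1)) pvLookup s := by
  intro n
  induction n with
  | zero =>
    intro s hs
    have : s = [] := List.eq_nil_of_length_eq_zero (Nat.le_zero.1 hs)
    subst this
    rw [pvFoldR_nil, pvScanC]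
  | succ n ihs =>
    intro s hs
    match s with
    | [] => rw [pvFoldR_nil, pvScanC]
    | c :: t =>
      cases hf : (pvPairsC.map (·.1)).find? (fun k => k.isPrefixOf (c :: t)) with
      | none =>
        have hnp : ∀ pv ∈ pvPairsC, ¬ pv.1 <+: (c :: t) := by
          intro pv hpv hpre
          have hthis := List.find?_eq_none.1 hf pv.1 (List.mem_map_of_mem hpv)
          simp [List.isPrefixOf_iff_prefix] at hthis
          exact hthis hpre
        rw [pvScanC]
        simp only [hf]
        rw [pvFoldCons c pvPairsC (fun pv h => h) t hnp,
          ihs t (by simp at hs; omega)]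
      | some k =>
        rw [List.find?_map] at hf
        cases hkv : pvPairsC.find? ((fun k => k.isPrefixOf (c :: t)) ∘ (·.1)) with
        | none => rw [hkv] at hf; simp at hf
        | some kv =>
          rw [hkv] at hf
          simp at hf
          obtain ⟨hpred, P₁, P₂, hsplit, hbefore⟩ := List.find?_eq_some_iff_append.1 hkv
          have hk : kv.1 = k := hf
          have hkpre : kv.1 <+: (c :: t) := List.isPrefixOf_iff_prefix.1 hpred
          obtain ⟨u, hu⟩ := hkpre
          have hmem : ∀ pv ∈ P₁ ++ kv :: P₂, pv ∈ pvPairsC := by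
            rw [← hsplit]; exact fun pv h => h
          have hP₁ : ∀ pv ∈ P₁, ¬ pv.1 <+: (kv.1 ++ u) := by
            intro pv hpv hpre
            rw [hu] at hpre
            have hb := hbefore pv hpv
            simp only [Bool.not_eq_true', Function.comp] at hb
            rw [List.isPrefixOf_iff_prefix.2 hpre] at hb
            simp at hb
          have hfold : pvFoldR pvPairsC (c :: t) = kv.2 ++ pvFoldR pvPairsC u := by
            conv_lhs => rw [← hu, hsplit]
            rw [pvFoldMatch P₁ P₂ kv.1 kv.2 hmem u hP₁, ← hsplit]
          have hkv_mem : kv ∈ pvPairsC := List.mem_of_find?_eq_some hkv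
          obtain ⟨hgk, _⟩ := pvFacts_good kv hkv_mem
          have hkne : kv.1 ≠ [] := pvGoodKey_ne hgk
          have hulen : u.length ≤ n := by
            have := congrArg List.length hu
            simp at this hs
            cases hkc : kv.1 with
            | nil => exact absurd hkc hkne
            | cons a b => rw [hkc] at this; simp at this; omega
          have hscan : pvScanC (pvPairsC.map (·.1)) pvLookup (c :: t)
              = pvLookup k ++ pvScanC (pvPairsC.map (·.1)) pvLookup (t.drop (k.length - 1)) := by
            rw [pvScanC]
            simp only [List.find?_map, hkv, Option.map_some]
            rw [hk]
          have hdrop : t.drop (k.length - 1) = u := by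
            have hdl : List.drop kv.1.length (kv.1 ++ u) = u := List.drop_left
            rw [hu] at hdl
            cases hkc : kv.1 with
            | nil => exact absurd hkc hkne
            | cons a b =>
              rw [hkc] at hdl
              rw [← hk, hkc]
              simpa using hdl
          rw [hscan, hdrop, hfold, ← hk, pvFacts_lookup kv hkv_mem, ihs u hulen]

-- bridge: port A's String fold equals the char-level fold
theorem pvBridgeA : ∀ (L : List (String × String)), (∀ pv ∈ L, pv.1.toList ≠ []) →
    ∀ (s : String),
      (L.foldl (fun result pv => PySem.Str.replace result pv.1 pv.2) s).toList
        = pvFoldR (L.map (fun pv => (pv.1.toList, pv.2.toList))) s.toList := by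
  intro L
  induction L with
  | nil => intro _ s; simp [pvFoldR]
  | cons qw rest ih =>
    intro hne s
    show (rest.foldl _ (PySem.Str.replace s qw.1 qw.2)).toList = _
    rw [ih (fun pv h => hne pv (by simp [h])) (PySem.Str.replace s qw.1 qw.2)]
    show _ = pvFoldR _ (pvRepl qw.1.toList qw.2.toList s.toList)
    rw [PySem.Str.toList_replace, pvReplace_eq _ _ _ (hne qw (by simp))]

-- ===== bridge from the alternation scan to B's brace-token scan =====

-- splitting facts
theorem pvSplit_some : ∀ (t name rest : List Char), pvSplitAtClose t = some (name, rest) →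
    t = name ++ '}' :: rest ∧ ∀ c ∈ name, c ≠ '}' := by
  intro t
  induction t with
  | nil => intro name rest h; simp [pvSplitAtClose] at h
  | cons c t' ih =>
    intro name rest h
    rw [pvSplitAtClose] at h
    by_cases hc : c = '}'
    · rw [if_pos hc] at h
      simp at h
      obtain ⟨h1, h2⟩ := h
      subst h1; subst h2; subst hc
      exact ⟨rfl, by simp⟩
    · rw [if_neg hc] at h
      cases hs : pvSplitAtClose t' with
      | none => rw [hs] at h; simp at h
      | some p =>
        rw [hs] at h
        simp at h
        obtain ⟨h1, h2⟩ := h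
        obtain ⟨ht', hnm⟩ := ih p.1 p.2 (by rw [hs])
        constructor
        · rw [← h1, ← h2, ht']; rfl
        · intro d hd
          rw [← h1] at hd
          rcases List.mem_cons.1 hd with hd | hd
          · rw [hd]; exact hc
          · exact hnm d hd

theorem pvSplit_none : ∀ (t : List Char), pvSplitAtClose t = none → '}' ∉ t := by
  intro t
  induction t with
  | nil => intro _; simp
  | cons c t' ih =>
    intro h
    rw [pvSplitAtClose] at h
    by_cases hc : c = '}'
    · rw [if_pos hc] at h; simp at h
    · rw [if_neg hc] at h
      cases hs : pvSplitAtClose t' with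
      | none =>
        intro hm
        rcases List.mem_cons.1 hm with hm | hm
        · exact hc hm.symm
        · exact ih hs hm
      | some p => rw [hs] at h; simp at h

-- a '}'-terminated token prefix of a '}'-terminated string determines the name
theorem pvNameUnique : ∀ (nm name rest : List Char), (∀ c ∈ nm, c ≠ '}') → (∀ c ∈ name, c ≠ '}') →
    (nm ++ ['}']) <+: (name ++ '}' :: rest) → nm = name := by
  intro nm
  induction nm with
  | nil =>
    intro name rest _ hname hpre
    cases name with
    | nil => rfl
    | cons b name' =>
      exfalso
      have hb : '}' = b := by simpa using hpre
      exact hname b (by simp) hb.symm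
  | cons a nm' ih =>
    intro name rest hnm hname hpre
    cases name with
    | nil =>
      exfalso
      have := (List.cons_prefix_cons.1 (by simpa using hpre)).1
      exact hnm a (by simp) this
    | cons b name' =>
      have h1 := (List.cons_prefix_cons.1 (by simpa using hpre)).1
      have h2 : (nm' ++ ['}']) <+: (name' ++ '}' :: rest) :=
        (List.cons_prefix_cons.1 (by simpa using hpre)).2
      have := ih name' rest (fun c hc => hnm c (by simp [hc])) (fun c hc => hname c (by simp [hc])) h2
      rw [h1, this]

-- every key is '{' :: name ++ ['}'] for an entry of pvParams
theorem pvKey_shape : ∀ k ∈ pvPairsC.map (·.1),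
    ∃ nv ∈ pvParams, k = '{' :: (nv.1.toList ++ ['}']) := by
  intro k hk
  rw [pvFacts_pairs] at hk
  simp only [List.map_map, List.mem_map] at hk
  obtain ⟨nv, hnv, hkeq⟩ := hk
  exact ⟨nv, hnv, hkeq.symm⟩

-- equation lemmas for pvScanB
theorem pvScanB_nil : pvScanB [] = [] := by rw [pvScanB]

theorem pvScanB_cons_not (c : Char) (t : List Char) (h : c ≠ '{') :
    pvScanB (c :: t) = c :: pvScanB t := by
  rw [pvScanB, if_neg h]

theorem pvScanB_open_none (t : List Char) (h : pvSplitAtClose t = none) :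
    pvScanB ('{' :: t) = '{' :: pvScanB t := by
  rw [pvScanB, if_pos rfl]
  split
  · rename_i name rest heq
    rw [h] at heq; exact absurd heq (by simp)
  · rfl

theorem pvScanB_open_some (t name rest : List Char) (h : pvSplitAtClose t = some (name, rest)) :
    pvScanB ('{' :: t) =
      (match pvParams.find? (fun nv => nv.1.toList == name) with
       | some nv => nv.2.toList ++ pvScanB rest
       | none => '{' :: pvScanB t) := by
  rw [pvScanB, if_pos rfl]
  split
  · rename_i name' rest' heq
    rw [h] at heq
    simp at heq
    obtain ⟨h1, h2⟩ := heq
    subst h1; subst h2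
    rfl
  · rename_i heq
    rw [h] at heq; exact absurd heq (by simp)

-- main part 2: the alternation scan equals B's brace-token scan
theorem pvScanCB : ∀ (n : Nat) (s : List Char), s.length ≤ n →
    pvScanC (pvPairsC.map (·.1)) pvLookup s = pvScanB s := by
  intro n
  induction n with
  | zero =>
    intro s hs
    have : s = [] := List.eq_nil_of_length_eq_zero (Nat.le_zero.1 hs)
    subst this
    rw [pvScanC, pvScanB_nil]
  | succ n ih =>
    intro s hs
    match s with
    | [] => rw [pvScanC, pvScanB_nil]
    | c :: t =>
      by_cases hc : c = '{'
      · subst hc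
        cases hsp : pvSplitAtClose t with
        | none =>
          -- no '}' in t: no key can be a prefix
          have hnoclose := pvSplit_none t hsp
          have hfnone : (pvPairsC.map (·.1)).find? (fun k => k.isPrefixOf ('{' :: t)) = none := by
            rw [List.find?_eq_none]
            intro k hk
            obtain ⟨nv, _, hkeq⟩ := pvKey_shape k hk
            simp only [Bool.not_eq_true]
            rw [Bool.eq_false_iff]
            intro hp
            have hpre := List.isPrefixOf_iff_prefix.1 hp
            rw [hkeq] at hpre
            have := (List.cons_prefix_cons.1 hpre).2
            exact hnoclose (this.subset (by simp))
          rw [pvScanC]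
          simp only [hfnone]
          rw [pvScanB_open_none t hsp, ih t (by simp at hs; omega)]
        | some p =>
          obtain ⟨name, rest⟩ := p
          obtain ⟨hteq, hnm⟩ := pvSplit_some t name rest hsp
          rw [pvScanB_open_some t name rest hsp]
          cases hfind : pvParams.find? (fun nv => nv.1.toList == name) with
          | none =>
            -- name unknown: no key is a prefix
            have hno : ∀ nv ∈ pvParams, nv.1.toList ≠ name := by
              intro nv hnv heq
              have := List.find?_eq_none.1 hfind nv hnv
              simp [heq] at this
            have hfnone : (pvPairsC.map (·.1)).find? (fun k => k.isPrefixOf ('{' :: t)) = none := by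
              rw [List.find?_eq_none]
              intro k hk
              obtain ⟨nv, hnv, hkeq⟩ := pvKey_shape k hk
              simp only [Bool.not_eq_true]
              rw [Bool.eq_false_iff]
              intro hp
              have hpre := List.isPrefixOf_iff_prefix.1 hp
              rw [hkeq, hteq] at hpre
              have htl : (nv.1.toList ++ ['}']) <+: (name ++ '}' :: rest) :=
                (List.cons_prefix_cons.1 hpre).2
              have := pvNameUnique nv.1.toList name rest
                (fun d hd => (pvFacts_names nv hnv d hd).1) hnm htl
              exact hno nv hnv this
            rw [pvScanC]
            simp only [hfnone]
            rw [ih t (by simp at hs; omega)]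
          | some nv =>
            -- name known: the unique matching key is '{' :: nv.1.toList ++ ['}']
            have hnv_mem : nv ∈ pvParams := List.mem_of_find?_eq_some hfind
            have hnveq : nv.1.toList = name := by
              have := List.find?_some hfind
              simpa using this
            set k0 : List Char := '{' :: (nv.1.toList ++ ['}']) with hk0
            have hk0mem : k0 ∈ pvPairsC.map (·.1) := by
              rw [pvFacts_pairs]
              simp only [List.map_map, List.mem_map]
              exact ⟨nv, hnv_mem, rfl⟩
            have hk0pre : k0 <+: ('{' :: t) := by
              rw [hk0, hteq, hnveq]
              exact List.cons_prefix_cons.2 ⟨rfl, ⟨rest, by simp⟩⟩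
            -- any matching key equals k0
            have huniq : ∀ k ∈ pvPairsC.map (·.1), k.isPrefixOf ('{' :: t) = true → k = k0 := by
              intro k hk hp
              obtain ⟨mv, hmv, hkeq⟩ := pvKey_shape k hk
              have hpre := List.isPrefixOf_iff_prefix.1 hp
              rw [hkeq, hteq] at hpre
              have htl : (mv.1.toList ++ ['}']) <+: (name ++ '}' :: rest) :=
                (List.cons_prefix_cons.1 hpre).2
              have heqn := pvNameUnique mv.1.toList name rest
                (fun d hd => (pvFacts_names mv hmv d hd).1) hnm htl
              rw [hkeq, hk0, heqn, hnveq]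
            have hfsome : (pvPairsC.map (·.1)).find? (fun k => k.isPrefixOf ('{' :: t)) = some k0 := by
              cases hf : (pvPairsC.map (·.1)).find? (fun k => k.isPrefixOf ('{' :: t)) with
              | none =>
                exfalso
                have := List.find?_eq_none.1 hf k0 hk0mem
                simp [List.isPrefixOf_iff_prefix.2 hk0pre] at this
              | some k =>
                have hkmem := List.mem_of_find?_eq_some hf
                have hkp := List.find?_some hf
                rw [huniq k hkmem hkp]
            rw [pvScanC]
            simp only [hfsome]
            have hlookup : pvLookup k0 = nv.2.toList := by
              have : (k0, nv.2.toList) ∈ pvPairsC := by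
                rw [pvFacts_pairs]
                exact List.mem_map_of_mem hnv_mem
              exact pvFacts_lookup (k0, nv.2.toList) this
            have hdrop : t.drop (k0.length - 1) = rest := by
              have hlen : k0.length - 1 = (name ++ ['}']).length := by
                rw [hk0, hnveq]; simp
              rw [hteq, hlen, show name ++ '}' :: rest = (name ++ ['}']) ++ rest by simp,
                List.drop_left]
            have hrestlen : rest.length ≤ n := by
              have := congrArg List.length hteq
              simp at this hs
              omega
            rw [hlookup, hdrop, ih rest hrestlen]
      · -- c ≠ '{': no key matches, both scans keep c
        have hfnone : (pvPairsC.map (·.1)).find? (fun k => k.isPrefixOf (c :: t)) = none := by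
          rw [List.find?_eq_none]
          intro k hk
          obtain ⟨nv, _, hkeq⟩ := pvKey_shape k hk
          simp only [Bool.not_eq_true]
          rw [Bool.eq_false_iff]
          intro hp
          have hpre := List.isPrefixOf_iff_prefix.1 hp
          rw [hkeq] at hpre
          exact hc (List.cons_prefix_cons.1 hpre).1.symm
        rw [pvScanC]
        simp only [hfnone]
        rw [pvScanB_cons_not c t hc, ih t (by simp at hs; omega)]

-- ===== VERDICT (by name: the statement is the Claim_ definition above) =====
theorem fill_path_params_py_spec : Claim_equal_fill_path_params_py := by
  intro path _
  show fill_path_params_py path = fill_path_params_py_alt path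
  have hA : (fill_path_params_py path).toList = pvFoldR pvPairsC path.toList := by
    rw [fill_path_params_py, pvBridgeA pvReplacements pvFacts_ne path]
    rfl
  have hB : fill_path_params_py_alt path = String.ofList (pvScanB path.toList) := rfl
  rw [hB, ← pvScanCB path.toList.length path.toList (le_refl _),
    ← pvMain path.toList.length path.toList (le_refl _), ← hA, String.ofList_toList]
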